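-- pv_equiv track=rewrite | github.com/elothamni1993/cementsite | cementsite/core/middleware.py | _parse_user_agent
-- ===== SOURCE A (Python) =====
-- def _parse_user_agent(user_agent):
--     """Parse device type, browser, and OS from user agent string"""
--     ua_lower = user_agent.lower()
--
--     # Device type detection
--     if any(x in ua_lower for x in ['mobile', 'android', 'iphone', 'ipod', 'blackberry', 'windows phone']):
--         device_type = "mobile"
--     elif any(x in ua_lower for x in ['ipad', 'tablet', 'kindle']):
--         device_type = "tablet"
--     else:
--         device_type = "desktop"
--
--     # Browser detection
--     if 'edg' in ua_lower:
--         browser = "Edge"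
--     elif 'chrome' in ua_lower and 'edg' not in ua_lower:
--         browser = "Chrome"
--     elif 'safari' in ua_lower and 'chrome' not in ua_lower:
--         browser = "Safari"
--     elif 'firefox' in ua_lower:
--         browser = "Firefox"
--     elif 'opera' in ua_lower or 'opr' in ua_lower:
--         browser = "Opera"
--     elif 'msie' in ua_lower or 'trident' in ua_lower:
--         browser = "IE"
--     else:
--         browser = "Other"
--
--     # OS detection
--     if 'windows' in ua_lower:
--         os_name = "Windows"
--     elif 'mac os' in ua_lower or 'macos' in ua_lower:
--         os_name = "macOS"
--     elif 'iphone' in ua_lower or 'ipad' in ua_lower: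
--         os_name = "iOS"
--     elif 'android' in ua_lower:
--         os_name = "Android"
--     elif 'linux' in ua_lower:
--         os_name = "Linux"
--     else:
--         os_name = "Other"
--
--     return device_type, browser, os_name
-- ===== SOURCE B (Python) =====
-- # B: flat keyword table; collect every matching keyword once, then pick the
-- # minimum-priority hit per category (min with key), instead of A's three
-- # ordered if/elif cascades with early exit. Equivalent because priorities
-- # mirror A's branch order and A's negated guards are redundant.
-- _TABLE = [
--     ('d', 0, 'mobile', 'mobile'),
--     ('d', 0, 'android', 'mobile'),
--     ('d', 0, 'iphone', 'mobile'),
--     ('d', 0, 'ipod', 'mobile'),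
--     ('d', 0, 'blackberry', 'mobile'),
--     ('d', 0, 'windows phone', 'mobile'),
--     ('d', 1, 'ipad', 'tablet'),
--     ('d', 1, 'tablet', 'tablet'),
--     ('d', 1, 'kindle', 'tablet'),
--     ('b', 0, 'edg', 'Edge'),
--     ('b', 1, 'chrome', 'Chrome'),
--     ('b', 2, 'safari', 'Safari'),
--     ('b', 3, 'firefox', 'Firefox'),
--     ('b', 4, 'opera', 'Opera'),
--     ('b', 4, 'opr', 'Opera'),
--     ('b', 5, 'msie', 'IE'),
--     ('b', 5, 'trident', 'IE'),
--     ('o', 0, 'windows', 'Windows'),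
--     ('o', 1, 'mac os', 'macOS'),
--     ('o', 1, 'macos', 'macOS'),
--     ('o', 2, 'iphone', 'iOS'),
--     ('o', 2, 'ipad', 'iOS'),
--     ('o', 3, 'android', 'Android'),
--     ('o', 4, 'linux', 'Linux'),
-- ]
--
--
-- def _best(hits, cat, default):
--     cand = [(p, lab) for c, p, lab in hits if c == cat]
--     return min(cand, key=lambda t: t[0])[1] if cand else default
--
--
-- def _parse_user_agent(user_agent):
--     ua = user_agent.lower()
--     hits = [(c, p, lab) for c, p, kw, lab in _TABLE if kw in ua]
--     return (_best(hits, 'd', 'desktop'),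
--             _best(hits, 'b', 'Other'),
--             _best(hits, 'o', 'Other'))
-- ===== Notes on version B (the rewrite author's own statement) =====
-- stated objective: alternative
-- what changed: Replaced A's three ordered if/elif cascades (first-match with early exit and redundant negative guards) by a single flat keyword table: B collects every matching keyword into a hit list in one pass and then selects, per category, the minimum-priority hit (min with key), with priorities mirroring A's branch order.
import Mathlib
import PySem

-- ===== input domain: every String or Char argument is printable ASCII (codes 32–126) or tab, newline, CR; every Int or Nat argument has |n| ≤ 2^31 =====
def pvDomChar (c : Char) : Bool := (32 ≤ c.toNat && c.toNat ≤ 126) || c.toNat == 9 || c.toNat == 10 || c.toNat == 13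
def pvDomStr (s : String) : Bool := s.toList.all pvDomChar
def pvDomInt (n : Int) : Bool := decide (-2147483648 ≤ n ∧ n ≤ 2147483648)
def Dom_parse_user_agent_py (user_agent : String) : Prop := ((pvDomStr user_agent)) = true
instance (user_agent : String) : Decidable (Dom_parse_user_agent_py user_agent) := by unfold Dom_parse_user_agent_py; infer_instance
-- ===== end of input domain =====

-- B replaces A's three ordered if/elif cascades by one flat keyword table: collect all
-- matching keywords, then pick the minimum-priority hit per category (objective: alternative).

-- ===== PORT A =====
def parse_user_agent_py (user_agent : String) : String × String × String :=
  let ua_lower := PySem.Str.lower user_agent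
  let device_type :=
    if ["mobile", "android", "iphone", "ipod", "blackberry", "windows phone"].any
        (fun x => PySem.Str.isIn x ua_lower) then "mobile"
    else if ["ipad", "tablet", "kindle"].any (fun x => PySem.Str.isIn x ua_lower) then "tablet"
    else "desktop"
  let browser :=
    if PySem.Str.isIn "edg" ua_lower then "Edge"
    else if PySem.Str.isIn "chrome" ua_lower && !PySem.Str.isIn "edg" ua_lower then "Chrome"
    else if PySem.Str.isIn "safari" ua_lower && !PySem.Str.isIn "chrome" ua_lower then "Safari"
    else if PySem.Str.isIn "firefox" ua_lower then "Firefox"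
    else if PySem.Str.isIn "opera" ua_lower || PySem.Str.isIn "opr" ua_lower then "Opera"
    else if PySem.Str.isIn "msie" ua_lower || PySem.Str.isIn "trident" ua_lower then "IE"
    else "Other"
  let os_name :=
    if PySem.Str.isIn "windows" ua_lower then "Windows"
    else if PySem.Str.isIn "mac os" ua_lower || PySem.Str.isIn "macos" ua_lower then "macOS"
    else if PySem.Str.isIn "iphone" ua_lower || PySem.Str.isIn "ipad" ua_lower then "iOS"
    else if PySem.Str.isIn "android" ua_lower then "Android"
    else if PySem.Str.isIn "linux" ua_lower then "Linux"
    else "Other"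
  (device_type, browser, os_name)

-- ===== PORT B =====
def pvTable : List (String × Int × String × String) :=
  [("d", 0, "mobile", "mobile"),
   ("d", 0, "android", "mobile"),
   ("d", 0, "iphone", "mobile"),
   ("d", 0, "ipod", "mobile"),
   ("d", 0, "blackberry", "mobile"),
   ("d", 0, "windows phone", "mobile"),
   ("d", 1, "ipad", "tablet"),
   ("d", 1, "tablet", "tablet"),
   ("d", 1, "kindle", "tablet"),
   ("b", 0, "edg", "Edge"),
   ("b", 1, "chrome", "Chrome"),
   ("b", 2, "safari", "Safari"),
   ("b", 3, "firefox", "Firefox"),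
   ("b", 4, "opera", "Opera"),
   ("b", 4, "opr", "Opera"),
   ("b", 5, "msie", "IE"),
   ("b", 5, "trident", "IE"),
   ("o", 0, "windows", "Windows"),
   ("o", 1, "mac os", "macOS"),
   ("o", 1, "macos", "macOS"),
   ("o", 2, "iphone", "iOS"),
   ("o", 2, "ipad", "iOS"),
   ("o", 3, "android", "Android"),
   ("o", 4, "linux", "Linux")]

def pvBest (hits : List (String × Int × String)) (cat : String) (default : String) : String :=
  let cand := hits.filterMap (fun e => if e.1 == cat then some (e.2.1, e.2.2) else none)
  match PySem.List.min? cand (fun t => t.1) with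
  | some m => m.2
  | none => default

def parse_user_agent_py_alt (user_agent : String) : String × String × String :=
  let ua := PySem.Str.lower user_agent
  let hits : List (String × Int × String) :=
    pvTable.filterMap (fun e =>
      if PySem.Str.isIn e.2.2.1 ua then some (e.1, e.2.1, e.2.2.2) else none)
  (pvBest hits "d" "desktop", pvBest hits "b" "Other", pvBest hits "o" "Other")

-- ===== PRECONDITION & SPEC =====
def Spec_parse_user_agent_py (user_agent : String) (out : String × String × String) : Prop := out = parse_user_agent_py_alt user_agent
instance (user_agent : String) (out : String × String × String) : Decidable (Spec_parse_user_agent_py user_agent out) := by unfold Spec_parse_user_agent_py; infer_instance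

-- ===== CLAIM (what is proved, stated in full; the proofs are below) =====
def Claim_equal_parse_user_agent_py : Prop := ∀ (user_agent : String), Dom_parse_user_agent_py user_agent → Spec_parse_user_agent_py user_agent (parse_user_agent_py user_agent)

-- ===== LEMMAS AND PROOFS =====

-- proof-side name for B's hit list (definitionally the inline term in parse_user_agent_py_alt)
def pvHits (s : String) : List (String × Int × String) :=
  pvTable.filterMap (fun e =>
    if PySem.Str.isIn e.2.2.1 s then some (e.1, e.2.1, e.2.2.2) else none)

-- a candidate list presented as "keyword matched?" flags paired with (priority, label)
def condList (l : List (Bool × Int × String)) : List (Int × String) :=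
  l.filterMap (fun e => if e.1 then some e.2 else none)

-- first-match cascade: the shape of A's if/elif chains
def firstTrue (l : List (Bool × Int × String)) (d : String) : String :=
  match l with
  | [] => d
  | e :: t => if e.1 then e.2.2 else firstTrue t d

theorem opt_bind_ite {α β : Type} (c : Prop) [Decidable c] (v : α) (g : α → Option β) :
    (if c then some v else none).bind g = if c then g v else none := by
  split_ifs <;> rfl

-- Python min keeps the FIRST minimal element: a head ≤ every later key is the result
theorem min?_cons_of_le (x : Int × String) (xs : List (Int × String))
    (h : ∀ y ∈ xs, x.1 ≤ y.1) :
    PySem.List.min? (x :: xs) (fun t => t.1) = some x := by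
  induction xs generalizing x with
  | nil => rfl
  | cons y t ih =>
      have hxy : ¬ ((y.1 : Int) < x.1) := not_lt.mpr (h y List.mem_cons_self)
      have step1 : PySem.List.min? (x :: y :: t) (fun t => t.1)
                 = PySem.List.min? (x :: t) (fun t => t.1) := by
        show List.foldl _ (if (y.1 : Int) < x.1 then some y else some x) t = _
        rw [if_neg hxy]
        rfl
      rw [step1]
      exact ih x (fun z hz => h z (List.mem_cons_of_mem _ hz))

-- key lemma: min-priority of the matched entries of a priority-sorted list = first match
theorem min?_condList (l : List (Bool × Int × String)) (d : String)
    (hs : l.Pairwise (fun x y => x.2.1 ≤ y.2.1)) :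
    (match PySem.List.min? (condList l) (fun t => t.1) with
     | some m => m.2
     | none => d) = firstTrue l d := by
  induction l with
  | nil => rfl
  | cons e t ih =>
      rcases List.pairwise_cons.mp hs with ⟨he, ht⟩
      by_cases hb : e.1 = true
      · have hc : condList (e :: t) = e.2 :: condList t := by
          simp [condList, hb]
        have harg : ∀ y ∈ condList t, e.2.1 ≤ y.1 := by
          intro y hy
          rcases List.mem_filterMap.mp hy with ⟨x, hx, hfx⟩
          by_cases hx1 : x.1 = true
          · simp [hx1] at hfx
            rw [← hfx]
            exact he x hx
          · simp [hx1] at hfx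
        have hmin : PySem.List.min? (condList (e :: t)) (fun t => t.1) = some e.2 := by
          rw [hc]
          exact min?_cons_of_le e.2 (condList t) harg
        rw [hmin]
        simp [firstTrue, hb]
      · have hc : condList (e :: t) = condList t := by
          simp [condList, hb]
        rw [hc, ih ht]
        simp [firstTrue, hb]

theorem best_d (s : String) :
    pvBest (pvHits s) "d" "desktop"
    = firstTrue
        [(PySem.Str.isIn "mobile" s, 0, "mobile"), (PySem.Str.isIn "android" s, 0, "mobile"),
         (PySem.Str.isIn "iphone" s, 0, "mobile"), (PySem.Str.isIn "ipod" s, 0, "mobile"),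
         (PySem.Str.isIn "blackberry" s, 0, "mobile"), (PySem.Str.isIn "windows phone" s, 0, "mobile"),
         (PySem.Str.isIn "ipad" s, 1, "tablet"), (PySem.Str.isIn "tablet" s, 1, "tablet"),
         (PySem.Str.isIn "kindle" s, 1, "tablet")] "desktop" := by
  rw [← min?_condList _ _ (by simp)]
  unfold pvBest pvHits
  rw [List.filterMap_filterMap]
  simp [pvTable, condList, List.filterMap_cons, opt_bind_ite]

theorem best_b (s : String) :
    pvBest (pvHits s) "b" "Other"
    = firstTrue
        [(PySem.Str.isIn "edg" s, 0, "Edge"), (PySem.Str.isIn "chrome" s, 1, "Chrome"),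
         (PySem.Str.isIn "safari" s, 2, "Safari"), (PySem.Str.isIn "firefox" s, 3, "Firefox"),
         (PySem.Str.isIn "opera" s, 4, "Opera"), (PySem.Str.isIn "opr" s, 4, "Opera"),
         (PySem.Str.isIn "msie" s, 5, "IE"), (PySem.Str.isIn "trident" s, 5, "IE")] "Other" := by
  rw [← min?_condList _ _ (by simp)]
  unfold pvBest pvHits
  rw [List.filterMap_filterMap]
  simp [pvTable, condList, List.filterMap_cons, opt_bind_ite]

theorem best_o (s : String) :
    pvBest (pvHits s) "o" "Other"
    = firstTrue
        [(PySem.Str.isIn "windows" s, 0, "Windows"), (PySem.Str.isIn "mac os" s, 1, "macOS"),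
         (PySem.Str.isIn "macos" s, 1, "macOS"), (PySem.Str.isIn "iphone" s, 2, "iOS"),
         (PySem.Str.isIn "ipad" s, 2, "iOS"), (PySem.Str.isIn "android" s, 3, "Android"),
         (PySem.Str.isIn "linux" s, 4, "Linux")] "Other" := by
  rw [← min?_condList _ _ (by simp)]
  unfold pvBest pvHits
  rw [List.filterMap_filterMap]
  simp [pvTable, condList, List.filterMap_cons, opt_bind_ite]

-- ===== VERDICT (by name: the statement is the Claim_ definition above) =====
set_option maxHeartbeats 1000000 in
theorem parse_user_agent_py_spec : Claim_equal_parse_user_agent_py := by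
  intro ua _
  unfold Spec_parse_user_agent_py parse_user_agent_py parse_user_agent_py_alt
  show _ = (pvBest (pvHits (PySem.Str.lower ua)) "d" "desktop",
            pvBest (pvHits (PySem.Str.lower ua)) "b" "Other",
            pvBest (pvHits (PySem.Str.lower ua)) "o" "Other")
  rw [best_d, best_b, best_o]
  simp only [Prod.mk.injEq]
  refine ⟨?_, ?_, ?_⟩
  · simp [firstTrue]
    generalize PySem.Chars.isIn ['m', 'o', 'b', 'i', 'l', 'e'] (PySem.Chars.lower ua.toList) = b0
    generalize PySem.Chars.isIn ['a', 'n', 'd', 'r', 'o', 'i', 'd'] (PySem.Chars.lower ua.toList) = b1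
    generalize PySem.Chars.isIn ['i', 'p', 'h', 'o', 'n', 'e'] (PySem.Chars.lower ua.toList) = b2
    generalize PySem.Chars.isIn ['i', 'p', 'o', 'd'] (PySem.Chars.lower ua.toList) = b3
    generalize PySem.Chars.isIn ['b', 'l', 'a', 'c', 'k', 'b', 'e', 'r', 'r', 'y'] (PySem.Chars.lower ua.toList) = b4
    generalize PySem.Chars.isIn ['w', 'i', 'n', 'd', 'o', 'w', 's', ' ', 'p', 'h', 'o', 'n', 'e'] (PySem.Chars.lower ua.toList) = b5
    generalize PySem.Chars.isIn ['i', 'p', 'a', 'd'] (PySem.Chars.lower ua.toList) = b6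
    generalize PySem.Chars.isIn ['t', 'a', 'b', 'l', 'e', 't'] (PySem.Chars.lower ua.toList) = b7
    generalize PySem.Chars.isIn ['k', 'i', 'n', 'd', 'l', 'e'] (PySem.Chars.lower ua.toList) = b8
    revert b0 b1 b2 b3 b4 b5 b6 b7 b8
    decide
  · simp [firstTrue]
    generalize PySem.Chars.isIn ['e', 'd', 'g'] (PySem.Chars.lower ua.toList) = b0
    generalize PySem.Chars.isIn ['c', 'h', 'r', 'o', 'm', 'e'] (PySem.Chars.lower ua.toList) = b1
    generalize PySem.Chars.isIn ['s', 'a', 'f', 'a', 'r', 'i'] (PySem.Chars.lower ua.toList) = b2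
    generalize PySem.Chars.isIn ['f', 'i', 'r', 'e', 'f', 'o', 'x'] (PySem.Chars.lower ua.toList) = b3
    generalize PySem.Chars.isIn ['o', 'p', 'e', 'r', 'a'] (PySem.Chars.lower ua.toList) = b4
    generalize PySem.Chars.isIn ['o', 'p', 'r'] (PySem.Chars.lower ua.toList) = b5
    generalize PySem.Chars.isIn ['m', 's', 'i', 'e'] (PySem.Chars.lower ua.toList) = b6
    generalize PySem.Chars.isIn ['t', 'r', 'i', 'd', 'e', 'n', 't'] (PySem.Chars.lower ua.toList) = b7
    revert b0 b1 b2 b3 b4 b5 b6 b7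
    decide
  · simp [firstTrue]
    generalize PySem.Chars.isIn ['w', 'i', 'n', 'd', 'o', 'w', 's'] (PySem.Chars.lower ua.toList) = b0
    generalize PySem.Chars.isIn ['m', 'a', 'c', ' ', 'o', 's'] (PySem.Chars.lower ua.toList) = b1
    generalize PySem.Chars.isIn ['m', 'a', 'c', 'o', 's'] (PySem.Chars.lower ua.toList) = b2
    generalize PySem.Chars.isIn ['i', 'p', 'h', 'o', 'n', 'e'] (PySem.Chars.lower ua.toList) = b3
    generalize PySem.Chars.isIn ['i', 'p', 'a', 'd'] (PySem.Chars.lower ua.toList) = b4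
    generalize PySem.Chars.isIn ['a', 'n', 'd', 'r', 'o', 'i', 'd'] (PySem.Chars.lower ua.toList) = b5
    generalize PySem.Chars.isIn ['l', 'i', 'n', 'u', 'x'] (PySem.Chars.lower ua.toList) = b6
    revert b0 b1 b2 b3 b4 b5 b6
    decide
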